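-- pv_equiv track=rewrite | github.com/jjsandhu155/AI | U3_Turns/Ghost/ghost.py | next_possible_boards
-- ===== SOURCE A (Python) =====
-- alphabet = 'abcdefghijklmnopqrstuvwxyz'
--
-- def next_possible_boards(word, dictionary):
--     possible_boards = []
--     for letter in alphabet:
--         temp = word + letter
--         for d in dictionary:
--             if d.startswith(temp):
--                 possible_boards.append((temp, letter))
--                 break
--     return possible_boards, {d for d in dictionary if d.startswith(word)}
-- ===== SOURCE B (Python) =====
-- alphabet = 'abcdefghijklmnopqrstuvwxyz'
--
-- def next_possible_boards(word, dictionary):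
--     # One pass over the dictionary: collect the prefix matches and the set of
--     # characters that follow the prefix, then list the alphabetic ones in order.
--     n = len(word)
--     matches = set()
--     next_letters = set()
--     for d in dictionary:
--         if d.startswith(word):
--             matches.add(d)
--             if len(d) > n:
--                 next_letters.add(d[n])
--     possible_boards = [(word + c, c) for c in alphabet if c in next_letters]
--     return possible_boards, matches
-- ===== Notes on version B (the rewrite author's own statement) =====
-- stated objective: faster
-- what changed: B makes a single pass over the dictionary collecting the prefix matches and the set of characters that follow the prefix, instead of A's 26 separate dictionary scans (one per alphabet letter) plus a final comprehension pass.
import Mathlib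
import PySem

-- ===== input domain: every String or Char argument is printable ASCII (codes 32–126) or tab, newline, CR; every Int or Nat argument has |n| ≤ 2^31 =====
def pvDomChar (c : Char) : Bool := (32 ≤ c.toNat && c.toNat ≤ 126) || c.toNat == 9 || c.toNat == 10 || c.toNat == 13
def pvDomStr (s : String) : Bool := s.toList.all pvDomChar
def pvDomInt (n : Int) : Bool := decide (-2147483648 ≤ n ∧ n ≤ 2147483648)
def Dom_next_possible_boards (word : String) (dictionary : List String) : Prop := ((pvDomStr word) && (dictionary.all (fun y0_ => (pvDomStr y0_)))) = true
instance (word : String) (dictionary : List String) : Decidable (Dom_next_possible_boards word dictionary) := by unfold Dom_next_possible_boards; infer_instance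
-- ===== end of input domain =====

-- B replaces A's 26 repeated dictionary scans by a single pass over the dictionary that
-- collects the matches and the set of next characters at once (objective: faster).

def pvAlphabet : List Char := "abcdefghijklmnopqrstuvwxyz".toList

-- ===== PORT A =====
-- for letter in alphabet: temp = word + letter; inner scan with break = "some dictionary word starts with temp"
def next_possible_boards (word : String) (dictionary : List String) : (List (String × String)) × List String :=
  let possible_boards := pvAlphabet.foldl (fun acc letter =>
    let temp := word ++ letter.toString
    if dictionary.any (fun d => PySem.Str.startswith d temp) then acc ++ [(temp, letter.toString)] else acc) []
  (possible_boards, PySem.Set.ofList (dictionary.filter (fun d => PySem.Str.startswith d word)))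

-- ===== PORT B =====
-- one pass: (matches, next_letters); n = len(word) is a Nat since Python's len is nonnegative;
-- d[n] is ported as d.toList.getD n ' ', exact under the guard n < len d
def next_possible_boards_alt (word : String) (dictionary : List String) : (List (String × String)) × List String :=
  let n := word.toList.length
  let st := dictionary.foldl (fun (acc : PySem.Set String × PySem.Set Char) d =>
    if PySem.Str.startswith d word then
      (PySem.Set.add acc.1 d,
       if n < d.toList.length then PySem.Set.add acc.2 (d.toList.getD n ' ') else acc.2)
    else acc) (PySem.Set.empty, PySem.Set.empty)
  ((pvAlphabet.filter (fun c => PySem.Set.contains st.2 c)).map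
      (fun c => (word ++ c.toString, c.toString)),
   st.1)

-- ===== PRECONDITION & SPEC =====
def Spec_next_possible_boards (word : String) (dictionary : List String) (out : (List (String × String)) × List String) : Prop := out = next_possible_boards_alt word dictionary
instance (word : String) (dictionary : List String) (out : (List (String × String)) × List String) : Decidable (Spec_next_possible_boards word dictionary out) := by unfold Spec_next_possible_boards; infer_instance

-- ===== CLAIM (what is proved, stated in full; the proofs are below) =====
def Claim_equal_next_possible_boards : Prop := ∀ (word : String) (dictionary : List String), Dom_next_possible_boards word dictionary → Spec_next_possible_boards word dictionary (next_possible_boards word dictionary)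

-- ===== LEMMAS AND PROOFS =====

-- B's pair-state fold splits into two independent folds.
theorem pv_fold_split (word : String) (l : List String) (s : PySem.Set String) (t : PySem.Set Char) :
    l.foldl (fun (acc : PySem.Set String × PySem.Set Char) d =>
      if PySem.Str.startswith d word then
        (PySem.Set.add acc.1 d,
         if word.toList.length < d.toList.length then PySem.Set.add acc.2 (d.toList.getD word.toList.length ' ') else acc.2)
      else acc) (s, t)
    = (l.foldl (fun s d => if PySem.Str.startswith d word then PySem.Set.add s d else s) s,
       l.foldl (fun t d => if PySem.Str.startswith d word then
          (if word.toList.length < d.toList.length then PySem.Set.add t (d.toList.getD word.toList.length ' ') else t) else t) t) := by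
  induction l generalizing s t with
  | nil => rfl
  | cons d l ih => simp only [List.foldl_cons]; split_ifs <;> apply ih

-- `wl ++ [c]` is a prefix of `dl` iff `wl` is, `dl` is long enough, and the next char is `c`.
theorem pv_prefix_snoc (wl dl : List Char) (c : Char) :
    wl ++ [c] <+: dl ↔ (wl <+: dl ∧ wl.length < dl.length ∧ dl.getD wl.length ' ' = c) := by
  induction wl generalizing dl with
  | nil =>
    cases dl with
    | nil => simp
    | cons x xs => simp [List.cons_prefix_cons, eq_comm]
  | cons a wl ih =>
    cases dl with
    | nil => simp
    | cons x xs =>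
      simp only [List.cons_append, List.cons_prefix_cons, ih, List.length_cons, List.getD_cons_succ]
      constructor
      · rintro ⟨h, hp, hl, hc⟩; exact ⟨⟨h, hp⟩, by omega, hc⟩
      · rintro ⟨⟨h, hp⟩, hl, hc⟩; exact ⟨h, hp, by omega, hc⟩

-- membership in B's next-letter accumulator
theorem pv_mem_letters (word : String) (l : List String) (t : PySem.Set Char) (c : Char) :
    c ∈ l.foldl (fun t d => if PySem.Str.startswith d word then
          (if word.toList.length < d.toList.length then PySem.Set.add t (d.toList.getD word.toList.length ' ') else t) else t) t
    ↔ c ∈ t ∨ ∃ d ∈ l, PySem.Str.startswith d word = true ∧ word.toList.length < d.toList.length ∧ d.toList.getD word.toList.length ' ' = c := by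
  induction l generalizing t with
  | nil => simp
  | cons d l ih =>
    simp only [List.foldl_cons]
    rw [ih]
    by_cases h1 : PySem.Str.startswith d word = true
    · by_cases h2 : word.toList.length < d.toList.length
      · simp only [h1, h2, if_true, PySem.Set.mem_add, List.mem_cons]
        constructor
        · rintro (⟨h | h⟩ | ⟨x, hx, hh⟩)
          · exact Or.inl h
          · exact Or.inr ⟨d, Or.inl rfl, h1, h2, h.symm⟩
          · exact Or.inr ⟨x, Or.inr hx, hh⟩
        · rintro (h | ⟨x, hx | hx, hh⟩)
          · exact Or.inl (Or.inl h)
          · subst hx; exact Or.inl (Or.inr hh.2.2.symm)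
          · exact Or.inr ⟨x, hx, hh⟩
      · simp only [h1, h2, if_true, if_false, List.mem_cons]
        constructor
        · rintro (h | ⟨x, hx, hh⟩)
          · exact Or.inl h
          · exact Or.inr ⟨x, Or.inr hx, hh⟩
        · rintro (h | ⟨x, hx | hx, hh⟩)
          · exact Or.inl h
          · subst hx; exact absurd hh.2.1 h2
          · exact Or.inr ⟨x, hx, hh⟩
    · simp only [h1, List.mem_cons]
      constructor
      · rintro (h | ⟨x, hx, hh⟩)
        · exact Or.inl h
        · exact Or.inr ⟨x, Or.inr hx, hh⟩
      · rintro (h | ⟨x, hx | hx, hh⟩)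
        · exact Or.inl h
        · subst hx; exact absurd hh.1 h1
        · exact Or.inr ⟨x, hx, hh⟩

-- A's per-letter existence test equals B's membership test in the collected letter set.
theorem pv_pred_eq (word : String) (dictionary : List String) (c : Char) :
    dictionary.any (fun d => PySem.Str.startswith d (word ++ c.toString))
    = PySem.Set.contains (dictionary.foldl (fun t d => if PySem.Str.startswith d word then
          (if word.toList.length < d.toList.length then PySem.Set.add t (d.toList.getD word.toList.length ' ') else t) else t) PySem.Set.empty) c := by
  rw [Bool.eq_iff_iff, List.any_eq_true, PySem.Set.contains_iff, pv_mem_letters]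
  simp only [PySem.Set.empty, List.not_mem_nil, false_or]
  constructor
  · rintro ⟨d, hd, hsw⟩
    refine ⟨d, hd, ?_⟩
    have : word.toList ++ [c] <+: d.toList := by
      have := (PySem.Str.startswith_eq d (word ++ c.toString)) ▸ hsw
      rw [PySem.Chars.startswith_iff] at this
      simpa [String.toList_append, String.toList_singleton] using this
    rw [pv_prefix_snoc] at this
    refine ⟨?_, this.2.1, this.2.2⟩
    rw [PySem.Str.startswith_eq, PySem.Chars.startswith_iff]
    exact this.1
  · rintro ⟨d, hd, hsw, hlen, hc⟩
    refine ⟨d, hd, ?_⟩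
    rw [PySem.Str.startswith_eq, PySem.Chars.startswith_iff] at hsw ⊢
    have hc1 : (c.toString).toList = [c] := String.toList_singleton c
    rw [String.toList_append, hc1, pv_prefix_snoc]
    exact ⟨hsw, hlen, hc⟩

-- ===== VERDICT (by name: the statement is the Claim_ definition above) =====
theorem next_possible_boards_spec : Claim_equal_next_possible_boards := by
  intro word dictionary _
  unfold Spec_next_possible_boards next_possible_boards next_possible_boards_alt
  dsimp only
  rw [pv_fold_split]
  dsimp only
  refine Prod.ext ?_ ?_
  · dsimp only
    rw [PySem.List.foldl_append_if]
    simp only [List.nil_append]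
    congr 1
    apply List.filter_congr
    intro c _
    exact pv_pred_eq word dictionary c
  · dsimp only
    rw [PySem.Set.ofList_eq_foldl, List.foldl_filter]
    rfl
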